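-- pv_equiv track=rewrite | github.com/bstanton773/kekambas-142_week5_day3 | whiteboard.py | solution
-- ===== SOURCE A (Python) =====
-- def solution(string):
--     output = ''
--     next_upper = False
--     for char in string:
--         if char in {'-', "_", " "}:
--             next_upper = True
--         elif next_upper:
--             output += char.upper()
--             next_upper = False
--         else:
--             output += char
--     return output
-- ===== SOURCE B (Python) =====
-- def solution(string):
--     delims = {'-', '_', ' '}
--     chars = list(string)
--     prevs = [None] + chars[:-1]
--     return ''.join(
--         c.upper() if p in delims else c
--         for p, c in zip(prevs, chars)
--         if c not in delims
--     )
-- ===== Notes on version B (the rewrite author's own statement) =====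
-- stated objective: alternative
-- what changed: Replaces the streaming pass carrying a next_upper flag by a stateless zip-with-predecessor formulation: each kept character is uppercased exactly when its immediate predecessor is a delimiter.
import Mathlib
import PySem

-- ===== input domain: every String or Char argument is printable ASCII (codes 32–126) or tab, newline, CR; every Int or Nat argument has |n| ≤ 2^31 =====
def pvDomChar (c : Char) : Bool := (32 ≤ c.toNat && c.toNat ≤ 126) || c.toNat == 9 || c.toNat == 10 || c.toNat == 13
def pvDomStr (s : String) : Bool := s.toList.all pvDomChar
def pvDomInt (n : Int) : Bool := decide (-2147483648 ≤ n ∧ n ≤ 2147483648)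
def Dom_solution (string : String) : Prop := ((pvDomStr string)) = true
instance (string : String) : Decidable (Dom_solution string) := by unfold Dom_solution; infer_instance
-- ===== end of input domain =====

-- B replaces A's streaming flag by a stateless zip-with-predecessor pass (alternative decomposition, same cost).

-- ===== PORT A =====
-- literal port of A: fold over the characters carrying (output, next_upper)
def solution (string : String) : String :=
  let st := string.toList.foldl
    (fun (acc : List Char × Bool) c =>
      if c = '-' ∨ c = '_' ∨ c = ' ' then (acc.1, true)
      else if acc.2 then (acc.1 ++ [PySem.Chars.upperChar c], false)
      else (acc.1 ++ [c], false))
    ([], false)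
  String.ofList st.1

-- ===== PORT B =====
-- literal port of Source B: pair each character with its predecessor (None for the first),
-- drop delimiters, uppercase a character whose predecessor is a delimiter
def solution_alt (string : String) : String :=
  let delims : List Char := ['-', '_', ' ']
  let chars := string.toList
  let prevs : List (Option Char) := none :: (chars.take (chars.length - 1)).map some
  String.ofList
    (((prevs.zip chars).filter (fun q => !decide (q.2 ∈ delims))).map
      (fun q =>
        if (match q.1 with | some p => decide (p ∈ delims) | none => false)
        then PySem.Chars.upperChar q.2 else q.2))

-- ===== PRECONDITION & SPEC =====
def Spec_solution (string : String) (out : String) : Prop := out = solution_alt string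
instance (string : String) (out : String) : Decidable (Spec_solution string out) := by unfold Spec_solution; infer_instance

-- ===== CLAIM (what is proved, stated in full; the proofs are below) =====
def Claim_equal_solution : Prop := ∀ (string : String), Dom_solution string → Spec_solution string (solution string)

-- ===== LEMMAS AND PROOFS =====

-- reference recursion: process the characters with the carried flag
def goSpec : Bool → List Char → List Char
  | _, [] => []
  | b, c :: r =>
    if c = '-' ∨ c = '_' ∨ c = ' ' then goSpec true r
    else (if b then PySem.Chars.upperChar c else c) :: goSpec false r

lemma foldl_eq_goSpec (cs : List Char) (out : List Char) (b : Bool) :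
    (cs.foldl
      (fun (acc : List Char × Bool) c =>
        if c = '-' ∨ c = '_' ∨ c = ' ' then (acc.1, true)
        else if acc.2 then (acc.1 ++ [PySem.Chars.upperChar c], false)
        else (acc.1 ++ [c], false))
      (out, b)).1 = out ++ goSpec b cs := by
  induction cs generalizing out b with
  | nil => simp [goSpec]
  | cons c r ih =>
    by_cases hd : c = '-' ∨ c = '_' ∨ c = ' '
    · simp [goSpec, hd, ih]
    · cases b <;> simp [goSpec, hd, ih]

-- B's core on the predecessor pairing equals the flag recursion
lemma core_zip (p : Option Char) (cs : List Char) :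
    ((((p :: cs.map some).zip cs).filter
        (fun q => !decide (q.2 ∈ (['-', '_', ' '] : List Char)))).map
      (fun q =>
        if (match q.1 with | some x => decide (x ∈ (['-', '_', ' '] : List Char)) | none => false)
        then PySem.Chars.upperChar q.2 else q.2))
      = goSpec (match p with | some x => decide (x ∈ (['-', '_', ' '] : List Char)) | none => false) cs := by
  induction cs generalizing p with
  | nil => simp [goSpec]
  | cons c r ih =>
    have h := ih (some c)
    by_cases hd : c = '-' ∨ c = '_' ∨ c = ' '
    · have hcd : (decide (c ∈ (['-', '_', ' '] : List Char))) = true := by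
        rcases hd with h' | h' | h' <;> simp [h']
      simp only [List.map_cons, List.zip_cons_cons, List.filter_cons, hcd, Bool.not_true,
        Bool.false_eq_true, if_false]
      rw [h, goSpec]
      simp [hd]
    · have hcd : (decide (c ∈ (['-', '_', ' '] : List Char))) = false := by
        simp only [List.mem_cons, decide_eq_false_iff_not]
        push Not
        refine ⟨?_, ?_, ?_⟩ <;> tauto
      simp only [List.map_cons, List.zip_cons_cons, List.filter_cons, hcd, Bool.not_false,
        if_true, List.map_cons]
      rw [h, goSpec]
      simp [hd]

-- the truncated predecessor list zips the same as the untruncated one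
lemma zip_take_trunc {α β : Type} (xs : List α) (ys : List β) :
    (xs.take ys.length).zip ys = xs.zip ys := by
  induction xs generalizing ys with
  | nil => simp
  | cons x xs ih =>
    cases ys with
    | nil => simp
    | cons y ys => simp [ih]

lemma zip_take_pred (p : Option Char) (cs : List Char) :
    ((p :: (cs.take (cs.length - 1)).map some).zip cs) = ((p :: cs.map some).zip cs) := by
  cases cs with
  | nil => rfl
  | cons c r =>
    simp only [List.zip_cons_cons, List.length_cons, Nat.add_sub_cancel]
    congr 1
    rw [List.map_take]
    exact zip_take_trunc _ r

-- ===== VERDICT (by name: the statement is the Claim_ definition above) =====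
theorem solution_spec : Claim_equal_solution := by
  intro s _
  show solution s = solution_alt s
  unfold solution solution_alt
  simp only []
  rw [foldl_eq_goSpec, zip_take_pred, core_zip]
  simp
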